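-- pv_equiv track=rewrite | github.com/H-Rusch/AdventOfCode-Python | aoc2018/solutions/day05.py | react_and_measure
-- ===== SOURCE A (Python) =====
-- def react_and_measure(polymer: str, ignore: str = None) -> int:
--     stack = []
--     for c in polymer:
--         # ignoring specific letters instead of removing them for part 2
--         if ignore is not None and c.lower() == ignore:
--             continue
--
--         if len(stack) > 0 and c == stack[-1].swapcase():
--             stack.pop()
--         else:
--             stack.append(c)
--
--     return len(stack)
-- ===== SOURCE B (Python) =====
-- def react_and_measure(polymer: str, ignore: str = None) -> int:
--     # pass 1: drop ignored letters; then repeatedly scan, deleting reactive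
--     # adjacent pairs, until a whole scan removes nothing.
--     chars = [c for c in polymer if ignore is None or c.lower() != ignore]
--     while True:
--         out = []
--         i = 0
--         n = len(chars)
--         while i < n:
--             if i + 1 < n and chars[i] == chars[i + 1].swapcase():
--                 i += 2
--             else:
--                 out.append(chars[i])
--                 i += 1
--         if len(out) == len(chars):
--             return len(out)
--         chars = out
-- ===== Notes on version B (the rewrite author's own statement) =====
-- stated objective: alternative
-- what changed: A's single left-to-right stack pass is replaced by a separate filter pass followed by repeated whole-list scans that delete every reactive adjacent pair found, looping until a scan removes nothing.
import Mathlib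
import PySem

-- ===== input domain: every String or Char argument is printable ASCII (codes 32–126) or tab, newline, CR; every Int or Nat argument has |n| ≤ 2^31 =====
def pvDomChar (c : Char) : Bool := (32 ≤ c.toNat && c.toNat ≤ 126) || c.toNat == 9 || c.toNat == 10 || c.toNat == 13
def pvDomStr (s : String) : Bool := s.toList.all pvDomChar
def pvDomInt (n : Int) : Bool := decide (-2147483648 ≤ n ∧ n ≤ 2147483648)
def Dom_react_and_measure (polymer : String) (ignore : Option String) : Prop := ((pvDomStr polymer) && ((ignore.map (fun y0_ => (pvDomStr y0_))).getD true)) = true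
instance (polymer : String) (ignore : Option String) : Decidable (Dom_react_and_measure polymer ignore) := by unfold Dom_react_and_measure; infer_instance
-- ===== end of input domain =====

-- B replaces A's single left-to-right stack pass by a filter pass followed by
-- repeated adjacent-pair-removal scans until a fixpoint (objective: alternative
-- algorithm, not faster).

-- shared char helpers, used verbatim by both ports:
-- Python's c.swapcase() (exact on the ASCII domain stated above)
def swapc (c : Char) : Char :=
  if 97 ≤ c.toNat ∧ c.toNat ≤ 122 then Char.ofNat (c.toNat - 32)
  else if 65 ≤ c.toNat ∧ c.toNat ≤ 90 then Char.ofNat (c.toNat + 32)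
  else c

-- "ignore is not None and c.lower() == ignore"
def skipC (ignore : Option String) (c : Char) : Bool :=
  match ignore with
  | none => false
  | some ig => String.ofList [PySem.Chars.lowerChar c] == ig

-- ===== PORT A =====
-- one body of A's loop after the `continue`: stack[-1] / pop / append
def stepA (stack : List Char) (c : Char) : List Char :=
  match stack.getLast? with
  | some t => if c = swapc t then stack.dropLast else stack ++ [c]
  | none => stack ++ [c]

def react_and_measure (polymer : String) (ignore : Option String) : Int :=
  ((polymer.toList.foldl
      (fun stack c => if skipC ignore c then stack else stepA stack c) []).length : Int)

-- ===== PORT B =====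
-- one scan: delete each reactive adjacent pair met, continue after it
def onePass : List Char → List Char
  | [] => []
  | [a] => [a]
  | a :: b :: t => if a = swapc b then onePass t else a :: onePass (b :: t)

theorem onePass_length_le : ∀ l : List Char, (onePass l).length ≤ l.length := by
  intro l
  induction l using onePass.induct with
  | case1 => simp [onePass]
  | case2 => simp [onePass]
  | case3 b t ih =>
    rw [onePass, if_pos rfl]
    simp only [List.length_cons]
    omega
  | case4 a b t h ih =>
    rw [onePass, if_neg h]
    simp only [List.length_cons] at ih ⊢
    omega

-- "while True: … if len(out) == len(chars): return …"
def reduceLoop (l : List Char) : List Char :=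
  if (onePass l).length = l.length then l else reduceLoop (onePass l)
termination_by l.length
decreasing_by
  have := onePass_length_le l
  omega

def react_and_measure_alt (polymer : String) (ignore : Option String) : Int :=
  ((reduceLoop (polymer.toList.filter (fun c => !skipC ignore c))).length : Int)

-- ===== PRECONDITION & SPEC =====
def Spec_react_and_measure (polymer : String) (ignore : Option String) (out : Int) : Prop := out = react_and_measure_alt polymer ignore
instance (polymer : String) (ignore : Option String) (out : Int) : Decidable (Spec_react_and_measure polymer ignore out) := by unfold Spec_react_and_measure; infer_instance

-- ===== CLAIM (what is proved, stated in full; the proofs are below) =====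
def Claim_equal_react_and_measure : Prop := ∀ (polymer : String) (ignore : Option String), Dom_react_and_measure polymer ignore → Spec_react_and_measure polymer ignore (react_and_measure polymer ignore)

-- ===== LEMMAS AND PROOFS =====

theorem toNat_ofNat' (n : Nat) (h : n < 55296) : (Char.ofNat n).toNat = n := by
  rw [Char.toNat_ofNat, if_pos (Or.inl h)]

theorem swapc_swapc (c : Char) : swapc (swapc c) = c := by
  have hv : Char.ofNat c.toNat = c := Char.ofNat_toNat c
  unfold swapc
  by_cases h1 : 97 ≤ c.toNat ∧ c.toNat ≤ 122
  · rw [if_pos h1]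
    have ht : (Char.ofNat (c.toNat - 32)).toNat = c.toNat - 32 := toNat_ofNat' _ (by omega)
    rw [if_neg (by omega), if_pos (by omega), ht]
    rw [show c.toNat - 32 + 32 = c.toNat by omega, hv]
  · rw [if_neg h1]
    by_cases h2 : 65 ≤ c.toNat ∧ c.toNat ≤ 90
    · rw [if_pos h2]
      have ht : (Char.ofNat (c.toNat + 32)).toNat = c.toNat + 32 := toNat_ofNat' _ (by omega)
      rw [if_pos (by omega), ht]
      rw [show c.toNat + 32 - 32 = c.toNat by omega, hv]
    · rw [if_neg h2, if_neg h1, if_neg h2]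

theorem ne_swapc_symm {a b : Char} (h : a ≠ swapc b) : b ≠ swapc a := by
  intro hb; exact h (by rw [hb, swapc_swapc])

-- proof-side normal form: prepend with cancellation, right fold
def ins (c : Char) : List Char → List Char
  | [] => [c]
  | d :: t => if c = swapc d then t else c :: d :: t

def nf (s : List Char) : List Char := s.foldr ins []

-- "no adjacent reactive pair"
def Irr : List Char → Prop
  | [] => True
  | [_] => True
  | a :: b :: t => a ≠ swapc b ∧ Irr (b :: t)

theorem Irr.tail' {d : Char} {t : List Char} (h : Irr (d :: t)) : Irr t := by
  cases t with
  | nil => trivial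
  | cons e t' => exact h.2

theorem ins_irr {r : List Char} (h : Irr r) (c : Char) : Irr (ins c r) := by
  cases r with
  | nil => exact trivial
  | cons d t =>
    by_cases hc : c = swapc d
    · simpa [ins, hc] using h.tail'
    · simp only [ins, if_neg hc]
      exact ⟨hc, h⟩

theorem ins_ins {r : List Char} (h : Irr r) (c : Char) :
    ins (swapc c) (ins c r) = r := by
  cases r with
  | nil => simp [ins]
  | cons d t =>
    by_cases hc : c = swapc d
    · simp only [ins, if_pos hc]
      cases t with
      | nil => simp [hc, swapc_swapc]
      | cons e t' =>
        have hde : d ≠ swapc e := h.1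
        have hcd : swapc c = d := by rw [hc, swapc_swapc]
        simp [hcd, hde]
    · simp [ins, hc]

theorem nf_irr (s : List Char) : Irr (nf s) := by
  induction s with
  | nil => trivial
  | cons c t ih => exact ins_irr ih c

theorem nf_of_irr {r : List Char} (h : Irr r) : nf r = r := by
  induction r with
  | nil => rfl
  | cons d t ih =>
    have ht : nf t = t := ih h.tail'
    show ins d (nf t) = d :: t
    rw [ht]
    cases t with
    | nil => rfl
    | cons e t' => simp [ins, h.1]

-- the A-side fold, on the reversed stack (head = top)
def gfold (rs : List Char) (s : List Char) : List Char :=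
  s.foldl (fun r c => ins c r) rs

theorem gfold_swap {rs : List Char} (h : Irr rs) (c : Char) (r : List Char) :
    gfold (ins c rs) r = gfold rs (ins c r) := by
  cases r with
  | nil => rfl
  | cons d r' =>
    by_cases hcd : c = swapc d
    · have hd : ins d (ins c rs) = rs := by
        have := ins_ins h (swapc d)
        rwa [swapc_swapc, ← hcd] at this
      show gfold (ins d (ins c rs)) r' = gfold rs (ins c (d :: r'))
      rw [hd, ins, if_pos hcd]
    · show gfold (ins d (ins c rs)) r' = gfold rs (ins c (d :: r'))
      rw [ins, if_neg hcd]; rfl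

theorem gfold_nf {rs : List Char} (h : Irr rs) (s : List Char) :
    gfold rs s = gfold rs (nf s) := by
  induction s generalizing rs with
  | nil => rfl
  | cons c s' ih =>
    show gfold (ins c rs) s' = gfold rs (nf (c :: s'))
    rw [ih (ins_irr h c)]
    exact gfold_swap h c (nf s')

theorem gfold_irr : ∀ r rs : List Char, Irr r →
    (∀ a b t t', rs = a :: t → r = b :: t' → b ≠ swapc a) →
    gfold rs r = r.reverse ++ rs := by
  intro r
  induction r with
  | nil => intro rs _ _; simp [gfold]
  | cons c t ih =>
    intro rs hirr hjoin
    have hins : ins c rs = c :: rs := by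
      cases rs with
      | nil => rfl
      | cons a t0 => simp [ins, hjoin a c t0 t rfl rfl]
    show gfold (ins c rs) t = (c :: t).reverse ++ rs
    rw [hins, ih (c :: rs) hirr.tail' ?_]
    · simp
    · intro a b t0 t' h1 h2
      injection h1 with h1a h1b
      have hcb : c ≠ swapc b := by
        rw [h2] at hirr
        exact hirr.1
      rw [← h1a]
      exact ne_swapc_symm hcb

theorem stepA_reverse (rs : List Char) (c : Char) :
    stepA rs.reverse c = (ins c rs).reverse := by
  cases rs with
  | nil => simp [stepA, ins]
  | cons d t =>
    by_cases hc : c = swapc d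
    · simp [stepA, ins, hc]
    · simp [stepA, ins, hc]

theorem foldl_stepA_reverse (s : List Char) : ∀ rs : List Char,
    s.foldl stepA rs.reverse = (gfold rs s).reverse := by
  induction s with
  | nil => intro rs; rfl
  | cons c s' ih =>
    intro rs
    show s'.foldl stepA (stepA rs.reverse c) = (gfold (ins c rs) s').reverse
    rw [stepA_reverse, ih (ins c rs)]

theorem foldl_skip_filter (p : Char → Bool) (f : List Char → Char → List Char) :
    ∀ (s : List Char) (st : List Char),
    s.foldl (fun st c => if p c then st else f st c) st = (s.filter (fun c => !p c)).foldl f st := by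
  intro s
  induction s with
  | nil => intro st; rfl
  | cons c t ih =>
    intro st
    by_cases hc : p c
    · simp [hc, ih]
    · simp [hc, ih]

-- B-side: one scan preserves the normal form
theorem onePass_nf (l : List Char) : nf (onePass l) = nf l := by
  induction l using onePass.induct with
  | case1 => rfl
  | case2 => rfl
  | case3 b t ih =>
    have hnt : nf (swapc b :: b :: t) = nf t := by
      show ins (swapc b) (ins b (nf t)) = nf t
      exact ins_ins (nf_irr t) b
    rw [onePass, if_pos rfl, ih, hnt]
  | case4 a b t h ih =>
    rw [onePass, if_neg h]
    show ins a (nf (onePass (b :: t))) = ins a (nf (b :: t))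
    rw [ih]

theorem onePass_eq_of_length (l : List Char) (h : (onePass l).length = l.length) :
    onePass l = l := by
  induction l using onePass.induct with
  | case1 => rfl
  | case2 => rfl
  | case3 b t ih =>
    exfalso
    have h1 := onePass_length_le t
    rw [onePass, if_pos rfl] at h
    have h2 : (swapc b :: b :: t).length = t.length + 2 := by simp
    omega
  | case4 a b t hab ih =>
    rw [onePass, if_neg hab] at h ⊢
    simp only [List.length_cons] at h
    have hb : (b :: t).length = t.length + 1 := by simp
    rw [ih (by omega)]

theorem irr_of_onePass_fix (l : List Char) (h : onePass l = l) : Irr l := by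
  induction l using onePass.induct with
  | case1 => trivial
  | case2 => trivial
  | case3 b t ih =>
    exfalso
    rw [onePass, if_pos rfl] at h
    have h1 := onePass_length_le t
    have h2 : (onePass t).length = (swapc b :: b :: t).length := by rw [h]
    have h3 : (swapc b :: b :: t).length = t.length + 2 := by simp
    omega
  | case4 a b t hab ih =>
    rw [onePass, if_neg hab] at h
    have ht : onePass (b :: t) = b :: t := by injection h
    exact ⟨hab, ih ht⟩

theorem reduceLoop_nf (l : List Char) : nf (reduceLoop l) = nf l := by
  induction l using reduceLoop.induct with
  | case1 l h => rw [reduceLoop, if_pos h]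
  | case2 l h ih => rw [reduceLoop, if_neg h, ih, onePass_nf]

theorem reduceLoop_irr (l : List Char) : Irr (reduceLoop l) := by
  induction l using reduceLoop.induct with
  | case1 l h => rw [reduceLoop, if_pos h]; exact irr_of_onePass_fix l (onePass_eq_of_length l h)
  | case2 l h ih => rw [reduceLoop, if_neg h]; exact ih

theorem reduceLoop_eq_nf (l : List Char) : reduceLoop l = nf l := by
  rw [← reduceLoop_nf l]; exact (nf_of_irr (reduceLoop_irr l)).symm

-- ===== VERDICT (by name: the statement is the Claim_ definition above) =====
theorem react_and_measure_spec : Claim_equal_react_and_measure := by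
  intro polymer ignore _
  unfold Spec_react_and_measure react_and_measure react_and_measure_alt
  rw [foldl_skip_filter (skipC ignore) stepA polymer.toList []]
  set fl := polymer.toList.filter (fun c => !skipC ignore c) with hfl
  have h0 : fl.foldl stepA ([] : List Char) = (gfold [] fl).reverse := by
    have := foldl_stepA_reverse fl ([] : List Char)
    simpa using this
  rw [h0, reduceLoop_eq_nf]
  have h1 : gfold [] fl = (nf fl).reverse := by
    rw [gfold_nf (rs := ([] : List Char)) trivial fl]
    have := gfold_irr (nf fl) [] (nf_irr fl) (by intro a b t t' h1 _; exact absurd h1 (by simp))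
    simpa using this
  rw [h1]
  simp
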